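-- pv_equiv track=rewrite | github.com/bepnye/evidence_extraction | scripts/verga_pytorch/convert_to_ben_format.py | word_piece_to_char_offset
-- ===== SOURCE A (Python) =====
-- def word_piece_to_char_offset(word_pieces, start, end):
--     """
--     Take an offset into word piece text, and convert it into character offsets.
--     @param word_piece_text is a list of word pieces corresponding with the given start + end.
--     @param start is the word piece token to start on.
--     @param end is the word piece token to end on.
--     @return a tuple corresponding to the new start/end
--     """
--     text = ''
--     ch_start, ch_end = -1, -1
--     #word_pieces = word_piece_text.split(' ')
--     for idx, wp in enumerate(word_pieces):
--         filtered_wp = wp.replace('##', '')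
--         if idx == start:
--             ch_start = len(text)
--
--         if idx == end:
--             ch_end   = len(text) # this may need to be -1
--
--         # only add a space if '##' does not appear
--         text += filtered_wp + ('' if wp != filtered_wp else ' ')
--
--     return (ch_start, ch_end)
-- ===== SOURCE B (Python) =====
-- def word_piece_to_char_offset(word_pieces, start, end):
--     """Table-build-then-lookup: prefix[i] = number of characters contributed
--     by word pieces 0..i-1; then the answers are single lookups."""
--     prefix = [0]
--     total = 0
--     for wp in word_pieces:
--         filtered = wp.replace('##', '')
--         total += len(filtered) + (1 if filtered == wp else 0)
--         prefix.append(total)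
--     n = len(word_pieces)
--     ch_start = prefix[start] if 0 <= start < n else -1
--     ch_end = prefix[end] if 0 <= end < n else -1
--     return (ch_start, ch_end)
-- ===== Notes on version B (the rewrite author's own statement) =====
-- stated objective: alternative
-- what changed: Replaces A's single scan that snapshots the running text length when the loop index hits start/end with a prefix-sum table of per-piece character contributions built once and then indexed directly for both offsets.
import Mathlib
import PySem

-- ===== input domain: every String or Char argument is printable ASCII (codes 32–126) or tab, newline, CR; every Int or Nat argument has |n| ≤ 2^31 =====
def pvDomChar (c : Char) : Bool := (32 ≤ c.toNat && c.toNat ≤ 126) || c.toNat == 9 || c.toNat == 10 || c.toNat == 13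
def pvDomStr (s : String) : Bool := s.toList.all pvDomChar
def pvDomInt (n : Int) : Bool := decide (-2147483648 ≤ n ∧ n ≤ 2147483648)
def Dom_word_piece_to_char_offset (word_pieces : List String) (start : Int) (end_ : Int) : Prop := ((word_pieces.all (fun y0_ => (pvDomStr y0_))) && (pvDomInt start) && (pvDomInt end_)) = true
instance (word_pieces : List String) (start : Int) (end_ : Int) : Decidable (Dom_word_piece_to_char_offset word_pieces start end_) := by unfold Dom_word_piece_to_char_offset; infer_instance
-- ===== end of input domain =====

-- B rebuilds the answer from a prefix-sum table of per-piece character contributions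
-- instead of A's mid-scan snapshotting of the running text length; return values proved equal.
-- ===== PORT A =====
-- the enumerate loop of A, with the running index as an explicit parameter
def pvALoop (pieces : List String) (idx : Int) (text : String) (cs ce : Int)
    (start end_ : Int) : Int × Int :=
  match pieces with
  | [] => (cs, ce)
  | wp :: rest =>
    let filtered := PySem.Str.replace wp "##" ""
    let cs := if idx = start then PySem.Str.len text else cs
    let ce := if idx = end_ then PySem.Str.len text else ce
    pvALoop rest (idx + 1) (text ++ filtered ++ (if wp ≠ filtered then "" else " ")) cs ce start end_

def word_piece_to_char_offset (word_pieces : List String) (start : Int) (end_ : Int) : Int × Int :=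
  pvALoop word_pieces 0 "" (-1) (-1) start end_

-- ===== PORT B =====
def word_piece_to_char_offset_alt (word_pieces : List String) (start : Int) (end_ : Int) : Int × Int :=
  let st := word_pieces.foldl (fun (st : List Int × Int) wp =>
    let filtered := PySem.Str.replace wp "##" ""
    let total := st.2 + PySem.Str.len filtered + (if filtered = wp then 1 else 0)
    (st.1 ++ [total], total)) ([0], 0)
  let pre := st.1
  let n : Int := PySem.List.len word_pieces
  let ch_start := if 0 ≤ start ∧ start < n then (PySem.List.pyGet? pre start).getD 0 else -1
  let ch_end := if 0 ≤ end_ ∧ end_ < n then (PySem.List.pyGet? pre end_).getD 0 else -1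
  (ch_start, ch_end)

-- ===== PRECONDITION & SPEC =====
def Spec_word_piece_to_char_offset (word_pieces : List String) (start : Int) (end_ : Int) (out : Int × Int) : Prop := out = word_piece_to_char_offset_alt word_pieces start end_
instance (word_pieces : List String) (start : Int) (end_ : Int) (out : Int × Int) : Decidable (Spec_word_piece_to_char_offset word_pieces start end_ out) := by unfold Spec_word_piece_to_char_offset; infer_instance

-- ===== CLAIM (what is proved, stated in full; the proofs are below) =====
def Claim_equal_word_piece_to_char_offset : Prop := ∀ (word_pieces : List String) (start : Int) (end_ : Int), Dom_word_piece_to_char_offset word_pieces start end_ → Spec_word_piece_to_char_offset word_pieces start end_ (word_piece_to_char_offset word_pieces start end_)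

-- ===== LEMMAS AND PROOFS =====

-- ===== VERDICT (by name: the statement is the Claim_ definition above) =====
-- per-piece character contribution (proof-side abbreviation; same value both ports add)
def pvContrib (wp : String) : Int :=
  PySem.Str.len (PySem.Str.replace wp "##" "") + (if PySem.Str.replace wp "##" "" = wp then 1 else 0)

def pvSum (pieces : List String) : Int := (pieces.map pvContrib).sum

-- the running text grows by exactly pvContrib wp at each step of A's loop
lemma pvLenStep (text wp : String) :
    PySem.Str.len (text ++ PySem.Str.replace wp "##" "" ++
      (if wp ≠ PySem.Str.replace wp "##" "" then "" else " ")) =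
    PySem.Str.len text + pvContrib wp := by
  rw [PySem.Str.len_append, PySem.Str.len_append, pvContrib]
  by_cases h : PySem.Str.replace wp "##" "" = wp
  · simp [h]; omega
  · simp [h, Ne.symm h]

-- one step of the range bookkeeping of A's loop
lemma pvComp (wp : String) (rest : List String) (idx : Int) (text : String) (x c : Int) :
    (if idx + 1 ≤ x ∧ x < idx + 1 + (rest.length : Int) then
        (PySem.Str.len text + pvContrib wp) + pvSum (rest.take (x - (idx + 1)).toNat)
      else (if idx = x then PySem.Str.len text else c))
    = if idx ≤ x ∧ x < idx + ((wp :: rest).length : Int) then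
        PySem.Str.len text + pvSum ((wp :: rest).take (x - idx).toNat) else c := by
  by_cases h1 : idx = x
  · subst h1
    rw [if_neg (by omega), if_pos rfl, if_pos (by simp only [List.length_cons]; push_cast; omega)]
    simp [pvSum]
  · by_cases h2 : idx + 1 ≤ x ∧ x < idx + 1 + (rest.length : Int)
    · have hk : (x - idx).toNat = (x - (idx + 1)).toNat + 1 := by omega
      rw [if_pos h2, if_pos (by simp only [List.length_cons]; push_cast; omega), hk, List.take_succ_cons]
      simp [pvSum]; ring
    · rw [if_neg h2, if_neg h1, if_neg (by simp only [List.length_cons]; push_cast; omega)]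

lemma pvALoop_eq (pieces : List String) : ∀ (idx : Int) (text : String) (cs ce start end_ : Int),
    pvALoop pieces idx text cs ce start end_ =
      ((if idx ≤ start ∧ start < idx + pieces.length then
          PySem.Str.len text + pvSum (pieces.take (start - idx).toNat) else cs),
       (if idx ≤ end_ ∧ end_ < idx + pieces.length then
          PySem.Str.len text + pvSum (pieces.take (end_ - idx).toNat) else ce)) := by
  induction pieces with
  | nil =>
    intro idx text cs ce s e
    simp only [pvALoop, List.length_nil, Int.natCast_zero, add_zero]
    rw [if_neg (by omega), if_neg (by omega)]
  | cons wp rest ih =>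
    intro idx text cs ce s e
    simp only [pvALoop]
    rw [ih, pvLenStep]; rw [pvComp, pvComp]

-- B's fold, characterized: the prefix list it builds, elementwise
def pvScan (t : Int) : List String → List Int
  | [] => []
  | wp :: rest => (t + pvContrib wp) :: pvScan (t + pvContrib wp) rest

lemma pvFoldl_eq (pieces : List String) : ∀ (pre : List Int) (t : Int),
    (pieces.foldl (fun (st : List Int × Int) wp =>
        let filtered := PySem.Str.replace wp "##" ""
        let total := st.2 + PySem.Str.len filtered + (if filtered = wp then 1 else 0)
        (st.1 ++ [total], total)) (pre, t))
    = (pre ++ pvScan t pieces, t + pvSum pieces) := by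
  induction pieces with
  | nil => intro pre t; simp [pvScan, pvSum]
  | cons wp rest ih =>
    intro pre t
    have hc : t + PySem.Str.len (PySem.Str.replace wp "##" "") +
        (if PySem.Str.replace wp "##" "" = wp then 1 else 0) = t + pvContrib wp := by
      rw [pvContrib]; ring
    simp only [List.foldl_cons, hc, ih]
    simp only [pvScan, pvSum, List.map_cons, List.sum_cons, List.append_assoc,
      List.singleton_append, Prod.mk.injEq]
    exact ⟨trivial, by ring⟩

lemma pvScan_get (pieces : List String) : ∀ (t : Int) (k : Nat), k ≤ pieces.length →
    (t :: pvScan t pieces)[k]? = some (t + pvSum (pieces.take k)) := by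
  induction pieces with
  | nil =>
    intro t k hk
    have hk0 : k = 0 := by simpa using hk
    subst hk0; simp [pvSum]
  | cons wp rest ih =>
    intro t k hk
    cases k with
    | zero => simp [pvSum]
    | succ k =>
      simp only [pvScan, List.getElem?_cons_succ, List.take_succ_cons]
      rw [ih (t + pvContrib wp) k (by simpa using hk)]
      simp only [pvSum, List.map_cons, List.sum_cons, Option.some.injEq]
      ring

theorem word_piece_to_char_offset_spec : Claim_equal_word_piece_to_char_offset := by
  intro word_pieces start end_ _
  unfold Spec_word_piece_to_char_offset word_piece_to_char_offset word_piece_to_char_offset_alt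
  rw [pvALoop_eq]
  simp only [pvFoldl_eq, PySem.List.len_eq]
  have side : ∀ x : Int, (if 0 ≤ x ∧ x < 0 + (word_pieces.length : Int) then
      PySem.Str.len "" + pvSum (word_pieces.take (x - 0).toNat) else -1)
      = (if 0 ≤ x ∧ x < (word_pieces.length : Int) then
          (PySem.List.pyGet? ([0] ++ pvScan 0 word_pieces) x).getD 0 else -1) := by
    intro x
    by_cases hx : 0 ≤ x ∧ x < (word_pieces.length : Int)
    · obtain ⟨k, rfl⟩ : ∃ k : Nat, x = (k : Int) := ⟨x.toNat, by omega⟩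
      rw [if_pos (by omega), if_pos hx]
      have hget : PySem.List.pyGet? ([(0:Int)] ++ pvScan 0 word_pieces) (k : Int) =
          some (0 + pvSum (word_pieces.take k)) := by
        rw [PySem.List.pyGet?_natCast]
        simpa using pvScan_get word_pieces 0 k (by omega)
      rw [hget]
      have harg : ((k : Int) - 0).toNat = k := by omega
      rw [harg]
      simp
    · rw [if_neg (by omega), if_neg hx]
  rw [side, side]
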